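-- pv_equiv track=rewrite | github.com/BranPLewis/Wolf_Goat_Cabbage | wgc.py | bfs
-- ===== SOURCE A (Python) =====
-- import collections
--
-- GOAL = (1,1,1,1)
--
-- def valid_moves(state):
--     states = []
--     farmer, wolf, goat, cabbage = state
--     if farmer == 0:
--         if farmer == wolf:
--             states.append((abs(1-farmer),abs(1-wolf),goat,cabbage))
--         if farmer == goat:
--             states.append((abs(1-farmer),wolf,abs(goat-1),cabbage))
--         if farmer == cabbage:
--             states.append((abs(1-farmer),wolf,goat,abs(1-cabbage)))
--         states.append((abs(1-farmer),wolf,goat,cabbage))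
--     if farmer == 1:
--         if farmer == wolf:
--             states.append((abs(1-farmer),abs(1-wolf),goat,cabbage))
--         if farmer == goat:
--             states.append((abs(1-farmer),wolf,abs(1-goat),cabbage))
--         if farmer == cabbage:
--             states.append((abs(1-farmer),wolf,goat,abs(1-cabbage)))
--         states.append((abs(1-farmer),wolf,goat,cabbage))
--     for move in states:
--           if move[1] == move[2] and move[0] != move[1]:
--                 states.remove(move)
--           if move[2] == move[3] and move[0] != move[2]:
--                 states.remove(move)
--     return states
--
-- def bfs(start_node):
--     queue = collections.deque()
--     queue_size = len(queue)
--     t_nodes = 1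
--     e_nodes = 0
--     visited = set()
--     visited.add(start_node)
--     queue.append((start_node, [start_node]))
--     while queue:
--         t_nodes += 1
--         current_node, path  = queue.popleft()
--         e_nodes += 1
--         if current_node == GOAL:
--             return path, queue_size, t_nodes, e_nodes
--         for next_node in valid_moves(current_node):
--             if next_node not in visited:
--                 visited.add(next_node)
--                 queue.append((next_node, path + [next_node]))
--         if len(queue) > queue_size:
--             queue_size = len(queue)
--     return None
-- ===== SOURCE B (Python) =====
-- GOAL = (1,1,1,1)
--
-- def valid_moves(state):
--     states = []
--     farmer, wolf, goat, cabbage = state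
--     if farmer == 0:
--         if farmer == wolf:
--             states.append((abs(1-farmer),abs(1-wolf),goat,cabbage))
--         if farmer == goat:
--             states.append((abs(1-farmer),wolf,abs(goat-1),cabbage))
--         if farmer == cabbage:
--             states.append((abs(1-farmer),wolf,goat,abs(1-cabbage)))
--         states.append((abs(1-farmer),wolf,goat,cabbage))
--     if farmer == 1:
--         if farmer == wolf:
--             states.append((abs(1-farmer),abs(1-wolf),goat,cabbage))
--         if farmer == goat:
--             states.append((abs(1-farmer),wolf,abs(1-goat),cabbage))
--         if farmer == cabbage:
--             states.append((abs(1-farmer),wolf,goat,abs(1-cabbage)))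
--         states.append((abs(1-farmer),wolf,goat,cabbage))
--     for move in states:
--           if move[1] == move[2] and move[0] != move[1]:
--                 states.remove(move)
--           if move[2] == move[3] and move[0] != move[2]:
--                 states.remove(move)
--     return states
--
-- def bfs(start_node):
--     # frontier-as-growing-list BFS: no deque, no visited set, no counter threading;
--     # parent dict doubles as the visited test, counters derived from the scan index.
--     parent = {start_node: None}
--     order = [start_node]
--     queue_size = 0
--     i = 0
--     while i < len(order):
--         current = order[i]
--         if current == GOAL:
--             path = []
--             node = current
--             while node is not None:
--                 path.append(node)
--                 node = parent[node]
--             path.reverse()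
--             return path, queue_size, i + 2, i + 1
--         for nxt in valid_moves(current):
--             if nxt not in parent:
--                 parent[nxt] = current
--                 order.append(nxt)
--         if len(order) - i - 1 > queue_size:
--             queue_size = len(order) - i - 1
--         i += 1
--     return None
-- ===== Notes on version B (the rewrite author's own statement) =====
-- stated objective: alternative
-- what changed: bfs drops the deque of (node, path) pairs entirely: B scans one growing discovery list with an index pointer (the list itself is the queue and the visited record together with a parent dict used for the membership test), derives t_nodes/e_nodes from the scan index instead of threading counters, and reconstructs the path from parent pointers only when the goal is reached; valid_moves is kept verbatim; Pre_ excludes only the inputs (f,v,v,v) with f in {0,1} and v outside {0,1}, on which A (and B alike) raises ValueError inside valid_moves.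
-- outside the precondition, e.g. on bfs((0, 5, 5, 5)): A raises ValueError, B raises ValueError
import Mathlib
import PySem

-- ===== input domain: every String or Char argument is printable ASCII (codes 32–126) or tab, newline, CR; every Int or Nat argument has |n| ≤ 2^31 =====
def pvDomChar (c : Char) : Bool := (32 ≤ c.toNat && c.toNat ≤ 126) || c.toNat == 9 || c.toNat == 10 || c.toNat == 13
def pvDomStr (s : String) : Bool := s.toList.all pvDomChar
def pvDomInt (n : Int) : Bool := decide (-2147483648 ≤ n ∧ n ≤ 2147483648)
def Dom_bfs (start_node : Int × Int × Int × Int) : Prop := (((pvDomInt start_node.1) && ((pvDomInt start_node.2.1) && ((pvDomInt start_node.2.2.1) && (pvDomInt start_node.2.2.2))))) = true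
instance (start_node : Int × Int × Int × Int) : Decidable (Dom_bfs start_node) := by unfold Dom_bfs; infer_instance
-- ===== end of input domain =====

-- B replaces the deque-of-paths BFS by an index-pointer scan over one growing discovery
-- list: no deque, no separate visited set (the parent dict is the visited test), no
-- threaded node counters (they are read off the scan index), and the path is rebuilt
-- from parent pointers at the goal (alternative decomposition, same results).

abbrev PVSt := Int × Int × Int × Int

def pvGoal : PVSt := (1, 1, 1, 1)

-- ===== PORT A =====
-- valid_moves is shared verbatim by both Pythons; its port is shared by both ports.
-- `states` as built by the two `if farmer == …:` blocks, appends in source order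
def pvGenMoves (state : PVSt) : List PVSt :=
  match state with
  | (farmer, wolf, goat, cabbage) =>
    let s0 : List PVSt := []
    let s1 :=
      if farmer = 0 then
        let a := if farmer = wolf then s0 ++ [(|1 - farmer|, |1 - wolf|, goat, cabbage)] else s0
        let b := if farmer = goat then a ++ [(|1 - farmer|, wolf, |goat - 1|, cabbage)] else a
        let c := if farmer = cabbage then b ++ [(|1 - farmer|, wolf, goat, |1 - cabbage|)] else b
        c ++ [(|1 - farmer|, wolf, goat, cabbage)]
      else s0
    if farmer = 1 then
      let a := if farmer = wolf then s1 ++ [(|1 - farmer|, |1 - wolf|, goat, cabbage)] else s1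
      let b := if farmer = goat then a ++ [(|1 - farmer|, wolf, |1 - goat|, cabbage)] else a
      let c := if farmer = cabbage then b ++ [(|1 - farmer|, wolf, goat, |1 - cabbage|)] else b
      c ++ [(|1 - farmer|, wolf, goat, cabbage)]
    else s1

-- `states.remove(move)` (the ValueError case falls back to the unchanged list; see pvPrune)
def pvRemove1 (xs : List PVSt) (v : PVSt) : List PVSt := (PySem.List.remove? xs v).getD xs

-- termination helper for the remove-while-iterating loop (cited by pvPrune's decreasing_by)
theorem pvRemove1_length_le (xs : List PVSt) (v : PVSt) : (pvRemove1 xs v).length ≤ xs.length := by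
  unfold pvRemove1
  by_cases h : v ∈ xs
  · rw [PySem.List.remove?_eq_some_erase xs v h]
    simp [h]
  · rw [(PySem.List.remove?_eq_none_iff xs v).mpr h]
    simp

-- Python's `for move in states: … states.remove(move) …` iterates by index, so a removal
-- makes the iterator skip the element that slid into the current slot; `remove` on an
-- absent element (ValueError: both conditions on the same move) is excluded by Pre_bfs,
-- the `.getD` fallback there is never exercised inside Pre_bfs.
def pvPrune (states : List PVSt) (i : Nat) : List PVSt :=
  if h : i < states.length then
    let move := states[i]
    let s1 := if move.2.1 = move.2.2.1 ∧ move.1 ≠ move.2.1 then pvRemove1 states move else states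
    let s2 := if move.2.2.1 = move.2.2.2 ∧ move.1 ≠ move.2.2.1 then pvRemove1 s1 move else s1
    pvPrune s2 (i + 1)
  else states
termination_by states.length - i
decreasing_by
  have h1 := pvRemove1_length_le states states[i]
  have h2 := pvRemove1_length_le (if states[i].2.1 = states[i].2.2.1 ∧ states[i].1 ≠ states[i].2.1 then
      pvRemove1 states states[i] else states) states[i]
  split_ifs at h2 ⊢ <;> omega

def pvValidMoves (state : PVSt) : List PVSt := pvPrune (pvGenMoves state) 0

-- the while-loop of A; fuel is only a totality guard (the reachable state space is finite,
-- 64 iterations are never exhausted on inputs the claim covers)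
def pvLoopA (fuel : Nat) (queue : List (PVSt × List PVSt)) (visited : PySem.Set PVSt)
    (queue_size t_nodes e_nodes : Int) : Option (List PVSt × Int × Int × Int) :=
  match fuel with
  | 0 => none
  | fuel + 1 =>
    match queue with
    | [] => none
    | (current, path) :: rest =>
      let t_nodes := t_nodes + 1
      let e_nodes := e_nodes + 1
      if current = pvGoal then some (path, queue_size, t_nodes, e_nodes)
      else
        let qv := (pvValidMoves current).foldl
          (fun (qv : List (PVSt × List PVSt) × PySem.Set PVSt) next =>
            if PySem.Set.contains qv.2 next then qv
            else (qv.1 ++ [(next, path ++ [next])], PySem.Set.add qv.2 next))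
          (rest, visited)
        let queue_size := if PySem.List.len qv.1 > queue_size then PySem.List.len qv.1 else queue_size
        pvLoopA fuel qv.1 qv.2 queue_size t_nodes e_nodes

def bfs (start_node : Int × Int × Int × Int) : Option ((List (Int × Int × Int × Int)) × Int × Int × Int) :=
  pvLoopA 64 [(start_node, [start_node])] (PySem.Set.add PySem.Set.empty start_node) 0 1 0

-- ===== PORT B =====
-- `while node is not None: path.append(node); node = parent[node]`; fuel is a totality
-- guard (the parent chain is acyclic and lies inside the dict, so size+1 steps suffice);
-- the `| none` KeyError branch is unreachable from bfs_alt
def pvWalk (fuel : Nat) (parent : PySem.Dict PVSt (Option PVSt)) (node : PVSt)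
    (path : List PVSt) : List PVSt :=
  match fuel with
  | 0 => path
  | fuel + 1 =>
    let path := path ++ [node]
    match parent.get? node with
    | some (some p) => pvWalk fuel parent p path
    | _ => path

-- B's `while i < len(order)` scan over the single growing discovery list; the counters
-- are not threaded, they are read off the index i at the goal; fuel is a totality guard
def pvLoopB (fuel : Nat) (order : List PVSt) (i : Nat)
    (parent : PySem.Dict PVSt (Option PVSt)) (queue_size : Int) :
    Option (List PVSt × Int × Int × Int) :=
  match fuel with
  | 0 => none
  | fuel + 1 =>
    if h : i < order.length then
      let current := order[i]
      if current = pvGoal then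
        some ((pvWalk (parent.size + 1) parent current []).reverse, queue_size,
          (i : Int) + 2, (i : Int) + 1)
      else
        let op := (pvValidMoves current).foldl
          (fun (op : List PVSt × PySem.Dict PVSt (Option PVSt)) nxt =>
            if op.2.contains nxt then op
            else (op.1 ++ [nxt], op.2.insert nxt (some current)))
          (order, parent)
        let queue_size := if PySem.List.len op.1 - (i : Int) - 1 > queue_size then
            PySem.List.len op.1 - (i : Int) - 1 else queue_size
        pvLoopB fuel op.1 (i + 1) op.2 queue_size
    else none

def bfs_alt (start_node : Int × Int × Int × Int) : Option ((List (Int × Int × Int × Int)) × Int × Int × Int) :=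
  pvLoopB 64 [start_node] 0 (PySem.Dict.empty.insert start_node none) 0

-- ===== PRECONDITION & SPEC =====
-- Pre_ excludes exactly the inputs (f,v,v,v) with f ∈ {0,1} and v ∉ {0,1}: there both
-- prune conditions hold for the single generated move and the second `states.remove`
-- raises ValueError in A (and in B, which keeps valid_moves verbatim).
def Pre_bfs (start_node : Int × Int × Int × Int) : Prop :=
  ¬ ((start_node.1 = 0 ∨ start_node.1 = 1) ∧ start_node.2.1 = start_node.2.2.1 ∧
     start_node.2.2.1 = start_node.2.2.2 ∧ ¬ (start_node.2.1 = 0 ∨ start_node.2.1 = 1))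
instance (start_node : Int × Int × Int × Int) : Decidable (Pre_bfs start_node) := by
  unfold Pre_bfs; infer_instance

def pvWitness_bfs : (Int × Int × Int × Int) := (0, 1, 0, 1)

def Spec_bfs (start_node : Int × Int × Int × Int) (out : Option ((List (Int × Int × Int × Int)) × Int × Int × Int)) : Prop := out = bfs_alt start_node
instance (start_node : Int × Int × Int × Int) (out : Option ((List (Int × Int × Int × Int)) × Int × Int × Int)) : Decidable (Spec_bfs start_node out) := by unfold Spec_bfs; infer_instance

-- ===== CLAIM (what is proved, stated in full; the proofs are below) =====
def Claim_equal_bfs : Prop := ∀ (start_node : Int × Int × Int × Int), Dom_bfs start_node → Pre_bfs start_node → Spec_bfs start_node (bfs start_node)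

-- ===== LEMMAS AND PROOFS =====

-- the parent chain from n back to the start: n, parent n, …, start (whose parent is None)
inductive PVChain (parent : PySem.Dict PVSt (Option PVSt)) : PVSt → List PVSt → Prop
  | base (n : PVSt) : parent.get? n = some none → PVChain parent n [n]
  | step (n p : PVSt) (l : List PVSt) : parent.get? n = some (some p) → PVChain parent p l →
      PVChain parent n (n :: l)

theorem pvWalk_eq (parent : PySem.Dict PVSt (Option PVSt)) (n : PVSt) (l : List PVSt)
    (hc : PVChain parent n l) : ∀ fuel : Nat, l.length ≤ fuel → ∀ path,
    pvWalk fuel parent n path = path ++ l := by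
  induction hc with
  | base n h =>
    intro fuel hf path
    match fuel, hf with
    | f + 1, _ => simp [pvWalk, h]
  | step n p l h _ ih =>
    intro fuel hf path
    match fuel, hf with
    | f + 1, hf =>
      simp only [pvWalk, h]
      rw [ih f (by simpa using hf) (path ++ [n])]
      simp

theorem pvGet?_mem_keys (parent : PySem.Dict PVSt (Option PVSt)) (k : PVSt) (v : Option PVSt)
    (h : parent.get? k = some v) : k ∈ parent.keys := by
  have hc : parent.contains k = true := by
    rw [PySem.Dict.contains_eq_isSome_get?, h]; rfl
  exact (PySem.Dict.contains_iff_mem_keys parent k).mp hc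

theorem pvChain_mem_keys (parent : PySem.Dict PVSt (Option PVSt)) (n : PVSt) (l : List PVSt)
    (hc : PVChain parent n l) : ∀ x ∈ l, x ∈ parent.keys := by
  induction hc with
  | base n h =>
    intro x hx
    simp only [List.mem_singleton] at hx
    subst hx
    exact pvGet?_mem_keys parent x none h
  | step n p l h hcl ih =>
    intro x hx
    rcases List.mem_cons.mp hx with rfl | hx
    · exact pvGet?_mem_keys parent x (some p) h
    · exact ih x hx

theorem pvChain_stable (parent parent' : PySem.Dict PVSt (Option PVSt)) (n : PVSt)
    (l : List PVSt) (hc : PVChain parent n l)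
    (h : ∀ x ∈ l, parent'.get? x = parent.get? x) : PVChain parent' n l := by
  induction hc with
  | base n h0 =>
    exact PVChain.base n (by rw [h n (by simp), h0])
  | step n p l h0 hcl ih =>
    exact PVChain.step n p l (by rw [h n (by simp), h0])
      (ih (fun x hx => h x (List.mem_cons_of_mem n hx)))

theorem pvChain_length_le (parent : PySem.Dict PVSt (Option PVSt)) (n : PVSt) (l : List PVSt)
    (hc : PVChain parent n l) (hnd : l.Nodup) :
    l.length ≤ parent.size := by
  have hsub : ∀ x ∈ l, x ∈ parent.keys := pvChain_mem_keys parent n l hc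
  have h1 : l.length ≤ parent.keys.length := by
    calc l.length = l.toFinset.card := (List.toFinset_card_of_nodup hnd).symm
    _ ≤ parent.keys.toFinset.card := by
        apply Finset.card_le_card
        intro x hx
        simp only [List.mem_toFinset] at hx ⊢
        exact hsub x hx
    _ ≤ parent.keys.length := List.toFinset_card_le parent.keys
  have h2 : parent.keys.length = parent.size := by
    simp [PySem.Dict.keys, PySem.Dict.size]
  omega

theorem pvForall₂_append {α β : Type} (R : α → β → Prop) (a c : List α) (b d : List β)
    (h1 : List.Forall₂ R a b) (h2 : List.Forall₂ R c d) : List.Forall₂ R (a ++ c) (b ++ d) := by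
  induction h1 with
  | nil => exact h2
  | cons h _ ih => exact List.Forall₂.cons h ih

-- the per-entry relation between A's (node, path) queue pair and B's bare node in the
-- discovery list: same node, and the path is the reversed parent chain of the node
def PVRel (parent : PySem.Dict PVSt (Option PVSt)) (a : PVSt × List PVSt) (b : PVSt) : Prop :=
  a.1 = b ∧ ∃ l, PVChain parent b l ∧ l.Nodup ∧ a.2 = l.reverse

-- the neighbour-expansion folds of the two loops stay in lockstep: A appends (node, path)
-- pairs to its queue and marks visits in the set, B appends bare nodes to the single
-- discovery list and marks visits (with parents) in the dict
theorem pvFold_sim (c : PVSt) (p : List PVSt) :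
    ∀ (moves : List PVSt) (qrest : List (PVSt × List PVSt)) (order : List PVSt) (i : Nat)
      (parent : PySem.Dict PVSt (Option PVSt)) (vis : PySem.Set PVSt) (lc : List PVSt),
    parent.keys.Nodup →
    (∀ x, PySem.Set.contains vis x = parent.contains x) →
    List.Forall₂ (PVRel parent) qrest (order.drop (i + 1)) →
    i + 1 ≤ order.length →
    PVChain parent c lc → lc.Nodup → p = lc.reverse →
    (moves.foldl
      (fun (qv : List (PVSt × List PVSt) × PySem.Set PVSt) next =>
        if PySem.Set.contains qv.2 next then qv
        else (qv.1 ++ [(next, p ++ [next])], PySem.Set.add qv.2 next))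
      (qrest, vis)).2.contains = (moves.foldl
      (fun (op : List PVSt × PySem.Dict PVSt (Option PVSt)) nxt =>
        if op.2.contains nxt then op
        else (op.1 ++ [nxt], op.2.insert nxt (some c)))
      (order, parent)).2.contains ∧
    (moves.foldl
      (fun (op : List PVSt × PySem.Dict PVSt (Option PVSt)) nxt =>
        if op.2.contains nxt then op
        else (op.1 ++ [nxt], op.2.insert nxt (some c)))
      (order, parent)).2.keys.Nodup ∧
    List.Forall₂ (PVRel (moves.foldl
      (fun (op : List PVSt × PySem.Dict PVSt (Option PVSt)) nxt =>
        if op.2.contains nxt then op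
        else (op.1 ++ [nxt], op.2.insert nxt (some c)))
      (order, parent)).2)
      (moves.foldl
      (fun (qv : List (PVSt × List PVSt) × PySem.Set PVSt) next =>
        if PySem.Set.contains qv.2 next then qv
        else (qv.1 ++ [(next, p ++ [next])], PySem.Set.add qv.2 next))
      (qrest, vis)).1
      ((moves.foldl
      (fun (op : List PVSt × PySem.Dict PVSt (Option PVSt)) nxt =>
        if op.2.contains nxt then op
        else (op.1 ++ [nxt], op.2.insert nxt (some c)))
      (order, parent)).1.drop (i + 1)) ∧
    i + 1 ≤ (moves.foldl
      (fun (op : List PVSt × PySem.Dict PVSt (Option PVSt)) nxt =>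
        if op.2.contains nxt then op
        else (op.1 ++ [nxt], op.2.insert nxt (some c)))
      (order, parent)).1.length := by
  intro moves
  induction moves with
  | nil =>
    intro qrest order i parent vis lc hk hcv hF hi _ _ _
    exact ⟨funext fun x => hcv x, hk, hF, hi⟩
  | cons m moves ih =>
    intro qrest order i parent vis lc hk hcv hF hi hch hnd hp
    simp only [List.foldl_cons]
    by_cases hm : parent.contains m = true
    · simp only [hcv m, hm, if_true]
      exact ih qrest order i parent vis lc hk hcv hF hi hch hnd hp
    · have hm' : parent.contains m = false := by
        cases h : parent.contains m
        · rfl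
        · exact absurd h hm
      simp only [hcv m, hm']
      simp only [Bool.false_eq_true, if_false]
      have hmkeys : m ∉ parent.keys := fun hmem =>
        hm ((PySem.Dict.contains_iff_mem_keys parent m).mpr hmem)
      have hstab : ∀ (l' : List PVSt), (∀ x ∈ l', x ∈ parent.keys) →
          ∀ x ∈ l', (parent.insert m (some c)).get? x = parent.get? x := by
        intro l' hl' x hx
        exact PySem.Dict.get?_insert_of_ne parent (some c)
          (fun hxm => hmkeys (hxm ▸ hl' x hx))
      have hch' : PVChain (parent.insert m (some c)) c lc :=
        pvChain_stable parent _ c lc hch (hstab lc (pvChain_mem_keys parent c lc hch))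
      refine ih (qrest ++ [(m, p ++ [m])]) (order ++ [m]) i (parent.insert m (some c))
        (PySem.Set.add vis m) lc ?_ ?_ ?_ ?_ hch' hnd hp
      · exact PySem.Dict.nodup_keys_insert parent m (some c) hk
      · intro x
        rw [PySem.Dict.contains_insert]
        by_cases hx : x = m
        · subst hx
          have h1 : PySem.Set.contains (PySem.Set.add vis x) x = true :=
            (PySem.Set.contains_iff _ _).mpr ((PySem.Set.mem_add vis x x).mpr (Or.inr rfl))
          rw [h1]
          simp
        · have hbeq : (x == m) = false := beq_eq_false_iff_ne.mpr hx
          rw [hbeq, Bool.false_or, ← hcv x]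
          rw [Bool.eq_iff_iff, PySem.Set.contains_iff, PySem.Set.contains_iff,
            PySem.Set.mem_add]
          exact ⟨fun h => h.resolve_right hx, Or.inl⟩
      · rw [List.drop_append_of_le_length hi]
        refine pvForall₂_append _ _ _ _ _ ?_ ?_
        · refine hF.imp ?_
          rintro a b ⟨hab, l', hch'', hnd', hp'⟩
          exact ⟨hab, l', pvChain_stable parent _ b l' hch''
            (hstab l' (pvChain_mem_keys parent b l' hch'')), hnd', hp'⟩
        · refine List.forall₂_cons.mpr ⟨?_, List.Forall₂.nil⟩
          refine ⟨rfl, m :: lc, ?_, ?_, ?_⟩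
          · exact PVChain.step m c lc (PySem.Dict.get?_insert_self parent m (some c)) hch'
          · exact List.nodup_cons.mpr
              ⟨fun hmem => hmkeys (pvChain_mem_keys parent c lc hch m hmem), hnd⟩
          · simp [hp]
      · simp only [List.length_append]
        omega

-- the two loops in lockstep: A enters an iteration with queue = the suffix of B's
-- discovery list from index i, t_nodes = i+1, e_nodes = i
theorem pvLoop_sim : ∀ (fuel : Nat) (qA : List (PVSt × List PVSt)) (order : List PVSt)
    (i : Nat) (parent : PySem.Dict PVSt (Option PVSt)) (vis : PySem.Set PVSt) (qs : Int),
    parent.keys.Nodup →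
    (∀ x, PySem.Set.contains vis x = parent.contains x) →
    List.Forall₂ (PVRel parent) qA (order.drop i) →
    pvLoopA fuel qA vis qs ((i : Int) + 1) (i : Int) = pvLoopB fuel order i parent qs := by
  intro fuel
  induction fuel with
  | zero => intro _ _ _ _ _ _ _ _ _; rfl
  | succ f ih =>
    intro qA order i parent vis qs hk hcv hF
    cases hqA : qA with
    | nil =>
      subst hqA
      have h0 := hF.length_eq
      simp only [List.length_nil, List.length_drop] at h0
      have hlen : ¬ i < order.length := by omega
      simp [pvLoopA, pvLoopB, hlen]
    | cons a qA' =>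
      obtain ⟨c0, p0⟩ := a
      have hF' := hqA ▸ hF
      have hlt : i < order.length := by
        by_contra hge
        rw [List.drop_eq_nil_iff.mpr (by omega)] at hF'
        cases hF'
      rw [List.drop_eq_getElem_cons hlt] at hF'
      cases hF' with
      | cons hab htail =>
        obtain ⟨hab1, lc, hch, hnd, hp⟩ := hab
        simp only at hab1 hp
        have hcur : order[i] = c0 := hab1.symm
        rw [← hab1] at hch
        simp only [pvLoopA, pvLoopB, dif_pos hlt, hcur]
        by_cases hg : c0 = pvGoal
        · rw [if_pos hg, if_pos hg]
          rw [pvWalk_eq parent c0 lc hch (parent.size + 1)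
            (by have := pvChain_length_le parent c0 lc hch hnd; omega) []]
          rw [hp]
          simp
          omega
        · rw [if_neg hg, if_neg hg]
          obtain ⟨hcv', hk', hF2, hle⟩ :=
            pvFold_sim c0 p0 (pvValidMoves c0) qA' order i parent vis lc hk hcv htail
              (by omega) hch hnd hp
          have hlenq : ((pvValidMoves c0).foldl
              (fun (qv : List (PVSt × List PVSt) × PySem.Set PVSt) next =>
                if PySem.Set.contains qv.2 next then qv
                else (qv.1 ++ [(next, p0 ++ [next])], PySem.Set.add qv.2 next))
              (qA', vis)).1.length = ((pvValidMoves c0).foldl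
              (fun (op : List PVSt × PySem.Dict PVSt (Option PVSt)) nxt =>
                if op.2.contains nxt then op
                else (op.1 ++ [nxt], op.2.insert nxt (some c0)))
              (order, parent)).1.length - (i + 1) := by
            have := hF2.length_eq
            simp only [List.length_drop] at this
            omega
          have hlen_eq : PySem.List.len ((pvValidMoves c0).foldl
              (fun (qv : List (PVSt × List PVSt) × PySem.Set PVSt) next =>
                if PySem.Set.contains qv.2 next then qv
                else (qv.1 ++ [(next, p0 ++ [next])], PySem.Set.add qv.2 next))
              (qA', vis)).1 = PySem.List.len ((pvValidMoves c0).foldl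
              (fun (op : List PVSt × PySem.Dict PVSt (Option PVSt)) nxt =>
                if op.2.contains nxt then op
                else (op.1 ++ [nxt], op.2.insert nxt (some c0)))
              (order, parent)).1 - (i : Int) - 1 := by
            simp only [PySem.List.len_eq]
            omega
          rw [hlen_eq]
          have hcast : ((i : Int) + 1) + 1 = ((i + 1 : Nat) : Int) + 1 := by push_cast; ring
          have hcast2 : (i : Int) + 1 = ((i + 1 : Nat) : Int) := by push_cast; ring
          rw [hcast, hcast2]
          exact ih _ _ _ _ _ _ hk' (fun x => congrFun hcv' x) hF2

-- ===== VERDICT (by name: the statement is the Claim_ definition above) =====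
theorem bfs_spec : Claim_equal_bfs := by
  intro start_node _ _
  unfold Spec_bfs bfs bfs_alt
  apply pvLoop_sim 64 _ _ 0
  · exact PySem.Dict.nodup_keys_insert _ _ _ PySem.Dict.nodup_keys_empty
  · intro x
    rw [PySem.Dict.contains_insert]
    rw [Bool.eq_iff_iff, PySem.Set.contains_iff, PySem.Set.mem_add]
    constructor
    · rintro (hx | rfl)
      · cases (PySem.Set.contains_iff PySem.Set.empty x).mpr hx  -- impossible: empty
      · simp
    · intro h
      rcases Bool.or_eq_true_iff.mp h with hbeq | hcontains
      · exact Or.inr (eq_of_beq hbeq)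
      · rw [PySem.Dict.contains_empty] at hcontains
        cases hcontains
  · refine List.forall₂_cons.mpr ⟨?_, List.Forall₂.nil⟩
    refine ⟨rfl, [start_node], ?_, by simp, rfl⟩
    exact PVChain.base start_node (PySem.Dict.get?_insert_self _ _ _)
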